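-- pv_equiv track=rewrite | github.com/luisalourenco/AdventOfCode | 2021/aoc.py | beacons_rotations
-- ===== SOURCE A (Python) =====
-- def beacons_rotations(beacons):
--     rotations = [[] for i in range(24)]
--
--     for (x,y,z) in beacons:
--         # positive x
--         rotations[0].append( (+x, +y, +z) )
--         rotations[1].append( (+x, -z, +y) )
--         rotations[2].append( (+x, -y, -z) )
--         rotations[3].append( (+x, +z, -y) )
--         # negative x
--         rotations[4].append( (-x, -y, +z) )
--         rotations[5].append( (-x, +z, +y) )
--         rotations[6].append( (-x, +y, -z) )
--         rotations[7].append( (-x, -z, -y) )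
--         # positive y
--         rotations[8].append( (+y, +z, +x) )
--         rotations[9].append( (+y, -x, +z) )
--         rotations[10].append( (+y, -z, -x) )
--         rotations[11].append( (+y, +x, -z) )
--         # negative y
--         rotations[12].append( (-y, -z, +x) )
--         rotations[13].append( (-y, +x, +z) )
--         rotations[14].append( (-y, +z, -x) )
--         rotations[15].append( (-y, -x, -z) )
--         # positive z
--         rotations[16].append( (+z, +x, +y) )
--         rotations[17].append( (+z, -y, +x) )
--         rotations[18].append( (+z, -x, -y) )
--         rotations[19].append( (+z, +y, -x) )
--         # negative z
--         rotations[20].append( (-z, -x, +y) )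
--         rotations[21].append( (-z, +y, +x) )
--         rotations[22].append( (-z, +x, -y) )
--         rotations[23].append( (-z, -y, -x) )
--     return rotations
-- ===== SOURCE B (Python) =====
-- # B: generate the 24 rotation matrices by composing generator matrices
-- # (cyclic axis permutation, 180-deg flip about z, 90-deg spin about the first
-- # axis), then apply each matrix to every beacon. Same outputs, same order.
--
-- def _matmul(A, B):
--     (a, b, c), (d, e, f), (g, h, i) = A
--     (p, q, r), (s, t, u), (v, w, x) = B
--     return ((a*p + b*s + c*v, a*q + b*t + c*w, a*r + b*u + c*x),
--             (d*p + e*s + f*v, d*q + e*t + f*w, d*r + e*u + f*x),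
--             (g*p + h*s + i*v, g*q + h*t + i*w, g*r + h*u + i*x))
--
-- def _apply(M, p):
--     (a, b, c), (d, e, f), (g, h, i) = M
--     x, y, z = p
--     return (a*x + b*y + c*z, d*x + e*y + f*z, g*x + h*y + i*z)
--
-- def _matrices():
--     I = ((1, 0, 0), (0, 1, 0), (0, 0, 1))
--     C = ((0, 1, 0), (0, 0, 1), (1, 0, 0))      # (x,y,z) -> (y,z,x)
--     F = ((-1, 0, 0), (0, -1, 0), (0, 0, 1))    # 180-deg flip about z
--     S = ((1, 0, 0), (0, 0, -1), (0, 1, 0))     # 90-deg spin about first axis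
--     Sinv = _matmul(S, _matmul(S, S))
--     mats = []
--     P = I
--     for _ in range(3):
--         for base, spin in ((P, S), (_matmul(F, P), Sinv)):
--             M = base
--             for _ in range(4):
--                 mats.append(M)
--                 M = _matmul(spin, M)
--         P = _matmul(C, P)
--     return mats
--
-- def beacons_rotations(beacons):
--     return [[_apply(M, p) for p in beacons] for M in _matrices()]
-- ===== Notes on version B (the rewrite author's own statement) =====
-- stated objective: alternative
-- what changed: Instead of 24 hard-coded sign/permutation tuples appended point-by-point, B generates the 24 rotation matrices by composing generator matrices (cyclic axis permutation, 180-degree flip, 90-degree spin) and then maps each matrix over the beacon list.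
import Mathlib
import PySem

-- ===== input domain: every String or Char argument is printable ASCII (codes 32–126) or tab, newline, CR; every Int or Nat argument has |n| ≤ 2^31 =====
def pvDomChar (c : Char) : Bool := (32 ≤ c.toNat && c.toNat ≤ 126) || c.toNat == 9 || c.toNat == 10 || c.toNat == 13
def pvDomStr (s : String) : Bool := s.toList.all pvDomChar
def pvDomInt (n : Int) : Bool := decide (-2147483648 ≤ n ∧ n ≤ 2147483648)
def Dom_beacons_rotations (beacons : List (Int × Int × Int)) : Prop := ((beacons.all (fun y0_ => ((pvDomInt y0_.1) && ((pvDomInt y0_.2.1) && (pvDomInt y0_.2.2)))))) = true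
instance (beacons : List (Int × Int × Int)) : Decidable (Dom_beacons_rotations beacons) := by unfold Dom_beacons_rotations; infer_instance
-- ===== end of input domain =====

-- B generates the 24 rotation matrices by composing generator matrices instead of
-- hard-coding 24 sign/permutation tuples; same return value (same order) as A.

-- ===== PORT A =====
-- one iteration of A's loop body: append the 24 transformed copies of the point
def pvAStep (r : List (List (Int × Int × Int))) (p : Int × Int × Int) : List (List (Int × Int × Int)) :=
  match r, p with
  | [r0, r1, r2, r3, r4, r5, r6, r7, r8, r9, r10, r11, r12, r13, r14, r15, r16, r17, r18, r19, r20, r21, r22, r23], (x, y, z) =>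
      [r0 ++ [(x, y, z)],
       r1 ++ [(x, -z, y)],
       r2 ++ [(x, -y, -z)],
       r3 ++ [(x, z, -y)],
       r4 ++ [(-x, -y, z)],
       r5 ++ [(-x, z, y)],
       r6 ++ [(-x, y, -z)],
       r7 ++ [(-x, -z, -y)],
       r8 ++ [(y, z, x)],
       r9 ++ [(y, -x, z)],
       r10 ++ [(y, -z, -x)],
       r11 ++ [(y, x, -z)],
       r12 ++ [(-y, -z, x)],
       r13 ++ [(-y, x, z)],
       r14 ++ [(-y, z, -x)],
       r15 ++ [(-y, -x, -z)],
       r16 ++ [(z, x, y)],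
       r17 ++ [(z, -y, x)],
       r18 ++ [(z, -x, -y)],
       r19 ++ [(z, y, -x)],
       r20 ++ [(-z, -x, y)],
       r21 ++ [(-z, y, x)],
       r22 ++ [(-z, x, -y)],
       r23 ++ [(-z, -y, -x)]]
  | _, _ => r

def beacons_rotations (beacons : List (Int × Int × Int)) : List (List (Int × Int × Int)) :=
  let rotations := (PySem.List.pyRange 0 24 1).map (fun _ => ([] : List (Int × Int × Int)))
  beacons.foldl pvAStep rotations

-- ===== PORT B =====
def pvMatmul (A B : ((Int × Int × Int) × (Int × Int × Int) × (Int × Int × Int))) :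
    ((Int × Int × Int) × (Int × Int × Int) × (Int × Int × Int)) :=
  match A, B with
  | ((a, b, c), (d, e, f), (g, h, i)), ((p, q, r), (s, t, u), (v, w, x)) =>
      ((a*p + b*s + c*v, a*q + b*t + c*w, a*r + b*u + c*x),
       (d*p + e*s + f*v, d*q + e*t + f*w, d*r + e*u + f*x),
       (g*p + h*s + i*v, g*q + h*t + i*w, g*r + h*u + i*x))

def pvApply (M : ((Int × Int × Int) × (Int × Int × Int) × (Int × Int × Int))) (p : Int × Int × Int) : Int × Int × Int :=
  match M, p with
  | ((a, b, c), (d, e, f), (g, h, i)), (x, y, z) =>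
      (a*x + b*y + c*z, d*x + e*y + f*z, g*x + h*y + i*z)

def pvMatrices : List ((Int × Int × Int) × (Int × Int × Int) × (Int × Int × Int)) :=
  let I := (((1:Int), (0:Int), (0:Int)), ((0:Int), (1:Int), (0:Int)), ((0:Int), (0:Int), (1:Int)))
  let C := (((0:Int), (1:Int), (0:Int)), ((0:Int), (0:Int), (1:Int)), ((1:Int), (0:Int), (0:Int)))
  let F := (((-1:Int), (0:Int), (0:Int)), ((0:Int), (-1:Int), (0:Int)), ((0:Int), (0:Int), (1:Int)))
  let S := (((1:Int), (0:Int), (0:Int)), ((0:Int), (0:Int), (-1:Int)), ((0:Int), (1:Int), (0:Int)))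
  let Sinv := pvMatmul S (pvMatmul S S)
  let outer := (PySem.List.pyRange 0 3 1).foldl
    (fun (st : List ((Int × Int × Int) × (Int × Int × Int) × (Int × Int × Int)) × ((Int × Int × Int) × (Int × Int × Int) × (Int × Int × Int))) _ =>
      let (mats, P) := st
      let mats2 := [(P, S), (pvMatmul F P, Sinv)].foldl
        (fun mats bp =>
          let (base, spin) := bp
          let r := (PySem.List.pyRange 0 4 1).foldl
            (fun (st2 : List ((Int × Int × Int) × (Int × Int × Int) × (Int × Int × Int)) × ((Int × Int × Int) × (Int × Int × Int) × (Int × Int × Int))) _ =>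
              let (ms, M) := st2
              (ms ++ [M], pvMatmul spin M)) (mats, base)
          r.1) mats
      (mats2, pvMatmul C P)) ([], I)
  outer.1

def beacons_rotations_alt (beacons : List (Int × Int × Int)) : List (List (Int × Int × Int)) :=
  pvMatrices.map (fun M => beacons.map (fun p => pvApply M p))

-- ===== PRECONDITION & SPEC =====
def Spec_beacons_rotations (beacons : List (Int × Int × Int)) (out : List (List (Int × Int × Int))) : Prop := out = beacons_rotations_alt beacons
instance (beacons : List (Int × Int × Int)) (out : List (List (Int × Int × Int))) : Decidable (Spec_beacons_rotations beacons out) := by unfold Spec_beacons_rotations; infer_instance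

-- ===== CLAIM (what is proved, stated in full; the proofs are below) =====
def Claim_equal_beacons_rotations : Prop := ∀ (beacons : List (Int × Int × Int)), Dom_beacons_rotations beacons → Spec_beacons_rotations beacons (beacons_rotations beacons)

-- ===== LEMMAS AND PROOFS =====
lemma pvMatrices_eq : pvMatrices =
  [(((1 : Int), (0 : Int), (0 : Int)), ((0 : Int), (1 : Int), (0 : Int)), ((0 : Int), (0 : Int), (1 : Int))),
   (((1 : Int), (0 : Int), (0 : Int)), ((0 : Int), (0 : Int), (-1 : Int)), ((0 : Int), (1 : Int), (0 : Int))),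
   (((1 : Int), (0 : Int), (0 : Int)), ((0 : Int), (-1 : Int), (0 : Int)), ((0 : Int), (0 : Int), (-1 : Int))),
   (((1 : Int), (0 : Int), (0 : Int)), ((0 : Int), (0 : Int), (1 : Int)), ((0 : Int), (-1 : Int), (0 : Int))),
   (((-1 : Int), (0 : Int), (0 : Int)), ((0 : Int), (-1 : Int), (0 : Int)), ((0 : Int), (0 : Int), (1 : Int))),
   (((-1 : Int), (0 : Int), (0 : Int)), ((0 : Int), (0 : Int), (1 : Int)), ((0 : Int), (1 : Int), (0 : Int))),
   (((-1 : Int), (0 : Int), (0 : Int)), ((0 : Int), (1 : Int), (0 : Int)), ((0 : Int), (0 : Int), (-1 : Int))),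
   (((-1 : Int), (0 : Int), (0 : Int)), ((0 : Int), (0 : Int), (-1 : Int)), ((0 : Int), (-1 : Int), (0 : Int))),
   (((0 : Int), (1 : Int), (0 : Int)), ((0 : Int), (0 : Int), (1 : Int)), ((1 : Int), (0 : Int), (0 : Int))),
   (((0 : Int), (1 : Int), (0 : Int)), ((-1 : Int), (0 : Int), (0 : Int)), ((0 : Int), (0 : Int), (1 : Int))),
   (((0 : Int), (1 : Int), (0 : Int)), ((0 : Int), (0 : Int), (-1 : Int)), ((-1 : Int), (0 : Int), (0 : Int))),
   (((0 : Int), (1 : Int), (0 : Int)), ((1 : Int), (0 : Int), (0 : Int)), ((0 : Int), (0 : Int), (-1 : Int))),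
   (((0 : Int), (-1 : Int), (0 : Int)), ((0 : Int), (0 : Int), (-1 : Int)), ((1 : Int), (0 : Int), (0 : Int))),
   (((0 : Int), (-1 : Int), (0 : Int)), ((1 : Int), (0 : Int), (0 : Int)), ((0 : Int), (0 : Int), (1 : Int))),
   (((0 : Int), (-1 : Int), (0 : Int)), ((0 : Int), (0 : Int), (1 : Int)), ((-1 : Int), (0 : Int), (0 : Int))),
   (((0 : Int), (-1 : Int), (0 : Int)), ((-1 : Int), (0 : Int), (0 : Int)), ((0 : Int), (0 : Int), (-1 : Int))),
   (((0 : Int), (0 : Int), (1 : Int)), ((1 : Int), (0 : Int), (0 : Int)), ((0 : Int), (1 : Int), (0 : Int))),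
   (((0 : Int), (0 : Int), (1 : Int)), ((0 : Int), (-1 : Int), (0 : Int)), ((1 : Int), (0 : Int), (0 : Int))),
   (((0 : Int), (0 : Int), (1 : Int)), ((-1 : Int), (0 : Int), (0 : Int)), ((0 : Int), (-1 : Int), (0 : Int))),
   (((0 : Int), (0 : Int), (1 : Int)), ((0 : Int), (1 : Int), (0 : Int)), ((-1 : Int), (0 : Int), (0 : Int))),
   (((0 : Int), (0 : Int), (-1 : Int)), ((-1 : Int), (0 : Int), (0 : Int)), ((0 : Int), (1 : Int), (0 : Int))),
   (((0 : Int), (0 : Int), (-1 : Int)), ((0 : Int), (1 : Int), (0 : Int)), ((1 : Int), (0 : Int), (0 : Int))),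
   (((0 : Int), (0 : Int), (-1 : Int)), ((1 : Int), (0 : Int), (0 : Int)), ((0 : Int), (-1 : Int), (0 : Int))),
   (((0 : Int), (0 : Int), (-1 : Int)), ((0 : Int), (-1 : Int), (0 : Int)), ((-1 : Int), (0 : Int), (0 : Int)))] := by rfl

lemma pvA_foldl (bs : List (Int × Int × Int)) (l0 l1 l2 l3 l4 l5 l6 l7 l8 l9 l10 l11 l12 l13 l14 l15 l16 l17 l18 l19 l20 l21 l22 l23 : List (Int × Int × Int)) :
    List.foldl pvAStep [l0, l1, l2, l3, l4, l5, l6, l7, l8, l9, l10, l11, l12, l13, l14, l15, l16, l17, l18, l19, l20, l21, l22, l23] bs =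
      [l0 ++ bs.map (fun q => match q with | (x,y,z) => (x, y, z)),
       l1 ++ bs.map (fun q => match q with | (x,y,z) => (x, -z, y)),
       l2 ++ bs.map (fun q => match q with | (x,y,z) => (x, -y, -z)),
       l3 ++ bs.map (fun q => match q with | (x,y,z) => (x, z, -y)),
       l4 ++ bs.map (fun q => match q with | (x,y,z) => (-x, -y, z)),
       l5 ++ bs.map (fun q => match q with | (x,y,z) => (-x, z, y)),
       l6 ++ bs.map (fun q => match q with | (x,y,z) => (-x, y, -z)),
       l7 ++ bs.map (fun q => match q with | (x,y,z) => (-x, -z, -y)),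
       l8 ++ bs.map (fun q => match q with | (x,y,z) => (y, z, x)),
       l9 ++ bs.map (fun q => match q with | (x,y,z) => (y, -x, z)),
       l10 ++ bs.map (fun q => match q with | (x,y,z) => (y, -z, -x)),
       l11 ++ bs.map (fun q => match q with | (x,y,z) => (y, x, -z)),
       l12 ++ bs.map (fun q => match q with | (x,y,z) => (-y, -z, x)),
       l13 ++ bs.map (fun q => match q with | (x,y,z) => (-y, x, z)),
       l14 ++ bs.map (fun q => match q with | (x,y,z) => (-y, z, -x)),
       l15 ++ bs.map (fun q => match q with | (x,y,z) => (-y, -x, -z)),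
       l16 ++ bs.map (fun q => match q with | (x,y,z) => (z, x, y)),
       l17 ++ bs.map (fun q => match q with | (x,y,z) => (z, -y, x)),
       l18 ++ bs.map (fun q => match q with | (x,y,z) => (z, -x, -y)),
       l19 ++ bs.map (fun q => match q with | (x,y,z) => (z, y, -x)),
       l20 ++ bs.map (fun q => match q with | (x,y,z) => (-z, -x, y)),
       l21 ++ bs.map (fun q => match q with | (x,y,z) => (-z, y, x)),
       l22 ++ bs.map (fun q => match q with | (x,y,z) => (-z, x, -y)),
       l23 ++ bs.map (fun q => match q with | (x,y,z) => (-z, -y, -x))] := by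
  induction bs generalizing l0 l1 l2 l3 l4 l5 l6 l7 l8 l9 l10 l11 l12 l13 l14 l15 l16 l17 l18 l19 l20 l21 l22 l23 with
  | nil => simp only [List.foldl_nil, List.map_nil, List.append_nil]
  | cons p bs ih =>
    obtain ⟨x, y, z⟩ := p
    rw [List.foldl_cons,
        show pvAStep [l0, l1, l2, l3, l4, l5, l6, l7, l8, l9, l10, l11, l12, l13, l14, l15, l16, l17, l18, l19, l20, l21, l22, l23] (x, y, z) =
          [l0 ++ [(x, y, z)],
          l1 ++ [(x, -z, y)],
          l2 ++ [(x, -y, -z)],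
          l3 ++ [(x, z, -y)],
          l4 ++ [(-x, -y, z)],
          l5 ++ [(-x, z, y)],
          l6 ++ [(-x, y, -z)],
          l7 ++ [(-x, -z, -y)],
          l8 ++ [(y, z, x)],
          l9 ++ [(y, -x, z)],
          l10 ++ [(y, -z, -x)],
          l11 ++ [(y, x, -z)],
          l12 ++ [(-y, -z, x)],
          l13 ++ [(-y, x, z)],
          l14 ++ [(-y, z, -x)],
          l15 ++ [(-y, -x, -z)],
          l16 ++ [(z, x, y)],
          l17 ++ [(z, -y, x)],
          l18 ++ [(z, -x, -y)],
          l19 ++ [(z, y, -x)],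
          l20 ++ [(-z, -x, y)],
          l21 ++ [(-z, y, x)],
          l22 ++ [(-z, x, -y)],
          l23 ++ [(-z, -y, -x)]] from rfl,
        ih]
    simp only [List.map_cons, List.append_assoc, List.singleton_append]

-- ===== VERDICT (by name: the statement is the Claim_ definition above) =====
theorem beacons_rotations_spec : Claim_equal_beacons_rotations := by
  intro bs _
  unfold Spec_beacons_rotations beacons_rotations beacons_rotations_alt
  rw [pvMatrices_eq]
  rw [show (PySem.List.pyRange 0 24 1).map (fun _ => ([] : List (Int × Int × Int))) =
      [[], [], [], [], [], [], [], [], [], [], [], [], [], [], [], [], [], [], [], [], [], [], [], []] from rfl]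
  rw [pvA_foldl]
  simp only [List.nil_append, List.map_cons, List.map_nil, List.cons.injEq]
  refine ⟨?_, ?_, ?_, ?_, ?_, ?_, ?_, ?_, ?_, ?_, ?_, ?_, ?_, ?_, ?_, ?_, ?_, ?_, ?_, ?_, ?_, ?_, ?_, ?_, trivial⟩ <;>
    (apply List.map_congr_left; rintro ⟨x, y, z⟩ -;
     simp only [pvApply, one_mul, zero_mul, neg_mul, add_zero, zero_add])
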